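-- pv_equiv track=rewrite | github.com/extragornax/AdventOfCode | 2020/Day 12/code.py | retDirection
-- ===== SOURCE A (Python) =====
-- def retDirection(currentDir, dire, amount):
--     while amount > 0:
--         if (dire == 'L'):
--             currentDir += 1
--         if (dire == 'R'):
--             currentDir -= 1
--         if currentDir == 0:
--             currentDir = 4
--         elif currentDir == 5:
--             currentDir = 1
--         amount -= 1
--     return currentDir
-- ===== SOURCE B (Python) =====
-- def retDirection(currentDir, dire, amount):
--     if amount <= 0:
--         return currentDir
--     if dire == 'L':
--         return (currentDir - 1 + amount) % 4 + 1
--     if dire == 'R':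
--         return (currentDir - 1 - amount) % 4 + 1
--     return currentDir
-- ===== Notes on version B (the rewrite author's own statement) =====
-- stated objective: faster
-- what changed: Replaced A's step-by-step rotation loop (one iteration per unit of amount) by a single O(1) modular-arithmetic formula (currentDir - 1 ± amount) % 4 + 1 on the 1-4 compass encoding, treating an unknown direction letter as no rotation.
-- intended difference: On rotations starting outside the 1-4 compass encoding (currentDir > 4 with 'L', currentDir < 1 with 'R', or a trajectory that never re-enters the band), and on non-'L'/'R' letters at currentDir 0 or 5, A drifts out of range or applies a leftover wrap-check (e.g. 6 for (5,'L',1)), while B returns the proper 1-4 compass value ((currentDir-1±amount)%4+1, resp. currentDir unchanged), which is the intended reading since directions are encoded 1-4. — e.g. on retDirection(5, "L", 1): A returns 6, B returns 2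
import Mathlib
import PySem

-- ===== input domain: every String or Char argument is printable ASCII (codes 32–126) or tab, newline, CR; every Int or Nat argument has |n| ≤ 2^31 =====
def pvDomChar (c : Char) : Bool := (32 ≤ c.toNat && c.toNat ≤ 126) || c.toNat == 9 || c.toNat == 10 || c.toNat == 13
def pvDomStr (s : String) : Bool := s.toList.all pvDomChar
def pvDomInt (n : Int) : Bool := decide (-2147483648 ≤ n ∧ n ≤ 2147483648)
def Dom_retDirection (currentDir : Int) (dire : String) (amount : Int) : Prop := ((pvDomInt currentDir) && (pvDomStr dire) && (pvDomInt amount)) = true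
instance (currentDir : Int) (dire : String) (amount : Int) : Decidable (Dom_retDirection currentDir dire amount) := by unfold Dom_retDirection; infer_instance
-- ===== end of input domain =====

-- B replaces A's O(amount) step-by-step rotation loop by one O(1) modular formula on the 1–4 compass encoding (objective: faster).

-- ===== PORT A =====
-- the while-loop of A: runs once per unit of amount while amount > 0
def retDirectionLoop (currentDir : Int) (dire : String) : Nat → Int
  | 0 => currentDir
  | n + 1 =>
    let c1 := if dire == "L" then currentDir + 1 else currentDir
    let c2 := if dire == "R" then c1 - 1 else c1
    let c3 := if c2 == 0 then (4 : Int) else if c2 == 5 then 1 else c2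
    retDirectionLoop c3 dire n

def retDirection (currentDir : Int) (dire : String) (amount : Int) : Int :=
  retDirectionLoop currentDir dire amount.toNat

-- ===== PORT B =====
def retDirection_alt (currentDir : Int) (dire : String) (amount : Int) : Int :=
  if amount ≤ 0 then currentDir
  else if dire == "L" then PySem.Int.mod (currentDir - 1 + amount) 4 + 1
  else if dire == "R" then PySem.Int.mod (currentDir - 1 - amount) 4 + 1
  else currentDir

-- ===== PRECONDITION & SPEC =====
-- On rotations starting outside the 1–4 compass encoding (currentDir > 4 with 'L', currentDir < 1 with 'R',
-- or a trajectory that never re-enters the band), and on non-'L'/'R' letters at currentDir 0 or 5, A drifts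
-- out of range or applies a leftover wrap-check, while B returns the proper 1–4 compass value (resp. leaves
-- currentDir unchanged) — the intended reading since directions are encoded 1–4.
def D_retDirection (currentDir : Int) (dire : String) (amount : Int) : Prop :=
  0 < amount ∧
    ((dire = "L" ∧ (4 < currentDir ∨ currentDir + amount < 0)) ∨
     (dire = "R" ∧ (currentDir < 1 ∨ 5 < currentDir - amount)) ∨
     (dire ≠ "L" ∧ dire ≠ "R" ∧ (currentDir = 0 ∨ currentDir = 5)))
instance (currentDir : Int) (dire : String) (amount : Int) : Decidable (D_retDirection currentDir dire amount) := by
  unfold D_retDirection; infer_instance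

def Spec_retDirection (currentDir : Int) (dire : String) (amount : Int) (out : Int) : Prop :=
  ¬ D_retDirection currentDir dire amount → out = retDirection_alt currentDir dire amount
instance (currentDir : Int) (dire : String) (amount : Int) (out : Int) : Decidable (Spec_retDirection currentDir dire amount out) := by
  unfold Spec_retDirection; infer_instance

def pvDiffWitness_retDirection : Int × String × Int := (5, "L", 1)
def pvDiffWitnessOut_retDirection : Int × Int := (6, 2)

-- ===== CLAIM =====
def Claim_unchanged_retDirection : Prop := ∀ (currentDir : Int) (dire : String) (amount : Int), Dom_retDirection currentDir dire amount → Spec_retDirection currentDir dire amount (retDirection currentDir dire amount)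
def Claim_changed_retDirection : Prop := Dom_retDirection (pvDiffWitness_retDirection.1) (pvDiffWitness_retDirection.2.1) (pvDiffWitness_retDirection.2.2) ∧ D_retDirection (pvDiffWitness_retDirection.1) (pvDiffWitness_retDirection.2.1) (pvDiffWitness_retDirection.2.2) ∧ retDirection (pvDiffWitness_retDirection.1) (pvDiffWitness_retDirection.2.1) (pvDiffWitness_retDirection.2.2) = pvDiffWitnessOut_retDirection.1 ∧ retDirection_alt (pvDiffWitness_retDirection.1) (pvDiffWitness_retDirection.2.1) (pvDiffWitness_retDirection.2.2) = pvDiffWitnessOut_retDirection.2 ∧ pvDiffWitnessOut_retDirection.1 ≠ pvDiffWitnessOut_retDirection.2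
def Claim_exact_retDirection : Prop := ∀ (currentDir : Int) (dire : String) (amount : Int), Dom_retDirection currentDir dire amount → D_retDirection currentDir dire amount → retDirection currentDir dire amount ≠ retDirection_alt currentDir dire amount

-- ===== LEMMAS AND PROOFS =====

theorem stepL (c : Int) (n : Nat) :
    retDirectionLoop c "L" (n + 1) =
      retDirectionLoop (if c + 1 = 0 then (4 : Int) else if c + 1 = 5 then 1 else c + 1) "L" n := by
  simp [retDirectionLoop, beq_iff_eq]

theorem stepR (c : Int) (n : Nat) :
    retDirectionLoop c "R" (n + 1) =
      retDirectionLoop (if c - 1 = 0 then (4 : Int) else if c - 1 = 5 then 1 else c - 1) "R" n := by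
  simp [retDirectionLoop, beq_iff_eq]

theorem stepO (dire : String) (hL : dire ≠ "L") (hR : dire ≠ "R") (c : Int) (n : Nat) :
    retDirectionLoop c dire (n + 1) =
      retDirectionLoop (if c = 0 then (4 : Int) else if c = 5 then 1 else c) dire n := by
  simp [retDirectionLoop, beq_iff_eq, hL, hR]

theorem loop_L (n : Nat) : ∀ (c : Int),
    retDirectionLoop c "L" (n + 1) =
      if c ≤ 4 ∧ 0 ≤ c + (n + 1 : Nat) then PySem.Int.mod (c + (n + 1 : Nat) - 1) 4 + 1
      else c + (n + 1 : Nat) := by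
  have hmod : ∀ a : Int, PySem.Int.mod a 4 = a % 4 := fun a =>
    PySem.Int.mod_eq_emod_of_pos (by norm_num)
  induction n with
  | zero =>
    intro c
    rw [stepL]
    simp only [retDirectionLoop, hmod]
    split_ifs <;> (push_cast; omega)
  | succ m ih =>
    intro c
    rw [stepL]
    by_cases h0 : c + 1 = 0
    · rw [if_pos h0, ih 4]; simp only [hmod]; split_ifs <;> (push_cast; omega)
    · rw [if_neg h0]
      by_cases h5 : c + 1 = 5
      · rw [if_pos h5, ih 1]; simp only [hmod]; split_ifs <;> (push_cast; omega)
      · rw [if_neg h5, ih (c + 1)]; simp only [hmod]; split_ifs <;> (push_cast; omega)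

theorem loop_R (n : Nat) : ∀ (c : Int),
    retDirectionLoop c "R" (n + 1) =
      if 1 ≤ c ∧ c - (n + 1 : Nat) ≤ 5 then PySem.Int.mod (c - (n + 1 : Nat) - 1) 4 + 1
      else c - (n + 1 : Nat) := by
  have hmod : ∀ a : Int, PySem.Int.mod a 4 = a % 4 := fun a =>
    PySem.Int.mod_eq_emod_of_pos (by norm_num)
  induction n with
  | zero =>
    intro c
    rw [stepR]
    simp only [retDirectionLoop, hmod]
    split_ifs <;> (push_cast; omega)
  | succ m ih =>
    intro c
    rw [stepR]
    by_cases h0 : c - 1 = 0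
    · rw [if_pos h0, ih 4]; simp only [hmod]; split_ifs <;> (push_cast; omega)
    · rw [if_neg h0]
      by_cases h5 : c - 1 = 5
      · rw [if_pos h5, ih 1]; simp only [hmod]; split_ifs <;> (push_cast; omega)
      · rw [if_neg h5, ih (c - 1)]; simp only [hmod]; split_ifs <;> (push_cast; omega)

theorem loop_other (dire : String) (hL : dire ≠ "L") (hR : dire ≠ "R") (n : Nat) : ∀ (c : Int),
    retDirectionLoop c dire (n + 1) =
      if c = 0 then (4 : Int) else if c = 5 then 1 else c := by
  induction n with
  | zero =>
    intro c
    rw [stepO dire hL hR]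
    simp only [retDirectionLoop]
  | succ m ih =>
    intro c
    rw [stepO dire hL hR, ih]
    split_ifs <;> omega

theorem mod4_bounds (a : Int) : 0 ≤ PySem.Int.mod a 4 ∧ PySem.Int.mod a 4 < 4 :=
  ⟨PySem.Int.mod_nonneg a (by norm_num), PySem.Int.mod_lt a (by norm_num)⟩

-- ===== VERDICT =====
theorem retDirection_spec : Claim_unchanged_retDirection := by
  intro c dire amount _ hnD
  unfold retDirection retDirection_alt
  by_cases hle : amount ≤ 0
  · have : amount.toNat = 0 := by omega
    rw [this, if_pos hle]; rfl
  · have hpos : 0 < amount := by omega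
    obtain ⟨n, hn⟩ : ∃ n : Nat, amount.toNat = n + 1 := ⟨amount.toNat - 1, by omega⟩
    have hcast : ((n + 1 : Nat) : Int) = amount := by omega
    rw [hn, if_neg hle]
    unfold D_retDirection at hnD
    push_neg at hnD
    by_cases hL : dire = "L"
    · subst hL
      rcases (hnD hpos).1 rfl with ⟨h1, h2⟩
      rw [loop_L n c, hcast, if_pos ⟨by omega, by omega⟩]
      simp only [beq_iff_eq, if_pos rfl]
      congr 1
      congr 1
      omega
    · by_cases hR : dire = "R"
      · subst hR
        rcases ((hnD hpos).2.1) rfl with ⟨h1, h2⟩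
        rw [loop_R n c, hcast, if_pos ⟨by omega, by omega⟩]
        have : ("R" == "L") = false := by decide
        simp only [this, Bool.false_eq_true, if_false, beq_iff_eq, if_pos rfl]
        congr 1
        congr 1
        omega
      · rcases ((hnD hpos).2.2) hL hR with ⟨h0, h5⟩
        rw [loop_other dire hL hR n c, if_neg h0, if_neg h5]
        simp [beq_iff_eq, hL, hR]

theorem retDirection_changed : Claim_changed_retDirection := by
  unfold Claim_changed_retDirection; decide

theorem retDirection_tight : Claim_exact_retDirection := by
  intro c dire amount _ hD
  unfold retDirection retDirection_alt
  obtain ⟨hpos, hcase⟩ := hD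
  obtain ⟨n, hn⟩ : ∃ n : Nat, amount.toNat = n + 1 := ⟨amount.toNat - 1, by omega⟩
  have hcast : ((n + 1 : Nat) : Int) = amount := by omega
  have hle : ¬ amount ≤ 0 := by omega
  rw [hn, if_neg hle]
  rcases hcase with ⟨hL, hout⟩ | ⟨hR, hout⟩ | ⟨hL, hR, hc⟩
  · subst hL
    have hb := mod4_bounds (c - 1 + amount)
    rw [loop_L n c, hcast, if_neg (by omega)]
    simp only [beq_iff_eq, if_true]
    omega
  · subst hR
    have hb := mod4_bounds (c - 1 - amount)
    have hRL : ("R" == "L") = false := by decide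
    rw [loop_R n c, hcast, if_neg (by omega)]
    simp only [hRL, Bool.false_eq_true, if_false, beq_iff_eq, if_true]
    omega
  · rw [loop_other dire hL hR n c]
    simp only [beq_iff_eq, hL, hR, if_false]
    split_ifs with h1 h2 <;> omega
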